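-- pv_equiv track=rewrite | github.com/joshanashakya/dissertation | workspace/dataset/java-python/GeeksForGeeks/1824/A/2.py | findNthNo
-- ===== SOURCE A (Python) =====
-- def reverse(s):
--     if len(s) == 0:
--         return s
--     else:
--         return reverse(s[1:]) + s[0]
--
-- def findNthNo(n):
--     res = "";
--     while (n >= 1):
--
--         # If n is odd, append
--         # 3 and move to parent
--         if (n & 1):
--             res = res + "3";
--             n = (int)((n - 1) / 2);
--
--             # If n is even, append 5
--             # and move to parent
--         else:
--             res = res + "5";
--             n = (int)((n - 2) / 2);
--
--     # Reverse res
--     # and return.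
--     return reverse(res);
-- ===== SOURCE B (Python) =====
-- def findNthNo(n):
--     if n < 1:
--         return ""
--     L = (n + 1).bit_length() - 1
--     off = n + 1 - (1 << L)
--     return "".join("5" if (off >> i) & 1 else "3" for i in range(L - 1, -1, -1))
-- ===== Notes on version B (the rewrite author's own statement) =====
-- stated objective: simpler
-- what changed: Replaces A's parent-walking halving loop with string accumulation plus a quadratic recursive reverse by a closed-form bit-length level computation and a single forward pass mapping the offset's bits to '3'/'5', with no reversal.
import Mathlib
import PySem

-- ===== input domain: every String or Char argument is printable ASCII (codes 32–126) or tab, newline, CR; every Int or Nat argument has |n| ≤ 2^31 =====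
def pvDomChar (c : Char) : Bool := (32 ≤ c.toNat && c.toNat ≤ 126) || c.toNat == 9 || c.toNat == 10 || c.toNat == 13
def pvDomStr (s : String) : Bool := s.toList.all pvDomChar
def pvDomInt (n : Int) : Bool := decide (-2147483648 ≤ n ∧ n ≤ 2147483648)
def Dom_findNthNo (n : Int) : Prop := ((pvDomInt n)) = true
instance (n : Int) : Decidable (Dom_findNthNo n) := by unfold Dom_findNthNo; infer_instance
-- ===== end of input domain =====

-- B replaces A's halving loop plus recursive string reverse by a closed-form bit-length
-- level computation and one forward pass over the offset's bits (objective: simpler).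

-- ===== PORT A =====
-- Python 'reverse': recursive reverse of a string, character lists here.
def pyReverse : List Char → List Char
  | [] => []
  | c :: s => pyReverse s ++ [c]

-- The while loop of findNthNo. '(int)((n-1)/2)' truncates the exact float (n-1)/2;
-- in the branch reached n ≥ 1 and the dividend is even and nonnegative, so Lean's
-- Int '/' computes the same value exactly.
def findNthNoLoop (n : Int) (res : List Char) : List Char :=
  if _h : 1 ≤ n then
    if n % 2 = 1 then findNthNoLoop ((n - 1) / 2) (res ++ ['3'])
    else findNthNoLoop ((n - 2) / 2) (res ++ ['5'])
  else res
termination_by n.toNat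
decreasing_by all_goals omega

def findNthNo (n : Int) : String := String.mk (pyReverse (findNthNoLoop n []))

-- ===== PORT B =====
-- '(off >> i) & 1' on the nonnegative off is exactly Nat.testBit of off.toNat.
def findNthNo_alt (n : Int) : String :=
  if n < 1 then "" else
    let L : Nat := PySem.Int.bitLength (n + 1) - 1
    let off : Int := n + 1 - 2 ^ L
    String.mk (((List.range L).reverse).map
      (fun i => if off.toNat.testBit i then '5' else '3'))

-- ===== PRECONDITION & SPEC =====
def Spec_findNthNo (n : Int) (out : String) : Prop := out = findNthNo_alt n
instance (n : Int) (out : String) : Decidable (Spec_findNthNo n out) := by unfold Spec_findNthNo; infer_instance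

-- ===== CLAIM (what is proved, stated in full; the proofs are below) =====
def Claim_equal_findNthNo : Prop := ∀ (n : Int), Dom_findNthNo n → Spec_findNthNo n (findNthNo n)

-- ===== LEMMAS AND PROOFS =====

theorem pyReverse_eq (s : List Char) : pyReverse s = s.reverse := by
  induction s with
  | nil => rfl
  | cons c s ih => simp [pyReverse, ih]

-- the trailing bits of m (all bits below the leading one), least significant first
def tailBits (m : Nat) : List Char :=
  (List.range (PySem.Int.bitLength (m : Int) - 1)).map
    (fun i => if m.testBit i then '5' else '3')

theorem bitLength_pos (m : Nat) (hm : 1 ≤ m) : 1 ≤ PySem.Int.bitLength (m : Int) := by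
  by_contra hc
  have h0 : PySem.Int.bitLength (m : Int) = 0 := by omega
  have h1 := PySem.Int.lt_two_pow_bitLength (m : Int)
  rw [h0, Int.natAbs_natCast] at h1
  simp at h1
  omega

theorem findNthNoLoop_append (n : Int) (res : List Char) :
    findNthNoLoop n res = res ++ findNthNoLoop n [] := by
  by_cases h : 1 ≤ n
  · by_cases ho : n % 2 = 1
    · conv_lhs => rw [findNthNoLoop]
      conv_rhs => rw [findNthNoLoop]
      simp only [h, dite_true, if_pos ho, List.nil_append]
      rw [findNthNoLoop_append _ (res ++ ['3']), findNthNoLoop_append _ ['3']]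
      simp
    · conv_lhs => rw [findNthNoLoop]
      conv_rhs => rw [findNthNoLoop]
      simp only [h, dite_true, if_neg ho, List.nil_append]
      rw [findNthNoLoop_append _ (res ++ ['5']), findNthNoLoop_append _ ['5']]
      simp
  · conv_lhs => rw [findNthNoLoop]
    conv_rhs => rw [findNthNoLoop]
    simp [h]
termination_by n.toNat
decreasing_by all_goals omega

theorem tailBits_rec (m : Nat) (hm : 2 ≤ m) :
    tailBits m = (if m % 2 = 1 then '5' else '3') :: tailBits (m / 2) := by
  have hL : PySem.Int.bitLength (m : Int) = PySem.Int.bitLength ((m / 2 : Nat) : Int) + 1 :=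
    PySem.Int.bitLength_natCast (by omega)
  have hL2 : 1 ≤ PySem.Int.bitLength ((m / 2 : Nat) : Int) := bitLength_pos _ (by omega)
  unfold tailBits
  rw [hL]
  have hrange : PySem.Int.bitLength ((m / 2 : Nat) : Int) + 1 - 1
      = (PySem.Int.bitLength ((m / 2 : Nat) : Int) - 1) + 1 := by omega
  rw [hrange, List.range_succ_eq_map]
  simp only [List.map_cons, List.map_map]
  congr 1
  · rw [Nat.testBit_zero]
    by_cases h : m % 2 = 1 <;> simp [h]
  · apply List.map_congr_left
    intro i _
    simp [Nat.testBit_succ]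

theorem loop_eq_tailBits (n : Int) : findNthNoLoop n [] = tailBits (n + 1).toNat := by
  by_cases h : 1 ≤ n
  · by_cases ho : n % 2 = 1
    · conv_lhs => rw [findNthNoLoop]
      simp only [h, dite_true, if_pos ho, List.nil_append]
      rw [findNthNoLoop_append, loop_eq_tailBits ((n - 1) / 2)]
      have hm : (n + 1).toNat % 2 = 0 := by omega
      have hm2 : 2 ≤ (n + 1).toNat := by omega
      have hdiv : ((n - 1) / 2 + 1).toNat = (n + 1).toNat / 2 := by omega
      rw [tailBits_rec _ hm2, hm, hdiv]
      simp
    · conv_lhs => rw [findNthNoLoop]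
      simp only [h, dite_true, if_neg ho, List.nil_append]
      rw [findNthNoLoop_append, loop_eq_tailBits ((n - 2) / 2)]
      have hm : (n + 1).toNat % 2 = 1 := by omega
      have hm2 : 2 ≤ (n + 1).toNat := by omega
      have hdiv : ((n - 2) / 2 + 1).toNat = (n + 1).toNat / 2 := by omega
      rw [tailBits_rec _ hm2, hm, hdiv]
      simp
  · conv_lhs => rw [findNthNoLoop]
    simp only [h, dite_false]
    have hm : (n + 1).toNat = 0 ∨ (n + 1).toNat = 1 := by omega
    rcases hm with h0 | h0 <;> rw [h0] <;> decide
termination_by n.toNat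
decreasing_by all_goals omega

theorem findNthNo_eq_alt (n : Int) : findNthNo n = findNthNo_alt n := by
  unfold findNthNo findNthNo_alt
  rw [pyReverse_eq, loop_eq_tailBits]
  by_cases h : n < 1
  · have hm : (n + 1).toNat = 0 ∨ (n + 1).toNat = 1 := by omega
    simp only [if_pos h]
    rcases hm with h0 | h0 <;> rw [h0] <;> decide
  · simp only [if_neg h]
    have hcast : ((n + 1 : Int)) = (((n + 1).toNat : Nat) : Int) := by omega
    set m : Nat := (n + 1).toNat with hm
    have hm1 : 1 ≤ m := by omega
    rw [hcast]
    set L : Nat := PySem.Int.bitLength ((m : Nat) : Int) - 1 with hL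
    have hLpos : 1 ≤ PySem.Int.bitLength ((m : Nat) : Int) := bitLength_pos m hm1
    have hlo : 2 ^ L ≤ m := by
      have hd := PySem.Int.two_pow_bitLength_le ((m : Nat) : Int)
        (by exact_mod_cast (by omega : (m : Int) ≠ 0))
      rwa [Int.natAbs_natCast, ← hL] at hd
    have hhi : m < 2 ^ (L + 1) := by
      have hd := PySem.Int.lt_two_pow_bitLength ((m : Nat) : Int)
      rw [Int.natAbs_natCast] at hd
      have hLe : PySem.Int.bitLength ((m : Nat) : Int) = L + 1 := by omega
      rwa [hLe] at hd
    have hoff : ((m : Int) - 2 ^ L).toNat = m - 2 ^ L := by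
      have h2 : ((2 : Int) ^ L) = ((2 ^ L : Nat) : Int) := by push_cast; ring
      omega
    rw [hoff]
    unfold tailBits
    rw [← hL, List.map_reverse]
    refine congrArg _ (congrArg List.reverse (List.map_congr_left ?_))
    intro i hi
    rw [List.mem_range] at hi
    have hrepr : m = 2 ^ L + (m - 2 ^ L) := by omega
    conv_lhs => rw [hrepr]
    rw [Nat.testBit_two_pow_add_gt hi]

-- ===== VERDICT (by name: the statement is the Claim_ definition above) =====
theorem findNthNo_spec : Claim_equal_findNthNo := by
  intro n _
  unfold Spec_findNthNo
  exact findNthNo_eq_alt n
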